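-- pv_equiv track=rewrite | github.com/jbkim0526/Problem_Solving | 프로그래머스/Level2/20. 디펜스 게임/sol2.py | solution
-- ===== SOURCE A (Python) =====
-- from queue import PriorityQueue
--
-- def solution(n, k, enemy):
--     answer = 0
--
--     enemies = len(enemy)
--     q = PriorityQueue(maxsize=enemies)
--     enemies_sum = 0
--     count = 0
--
--     for i in range(enemies):
--         enemy_num = enemy[i]
--         q.put(-1*enemy[i])
--         enemies_sum += enemy_num
--         if enemies_sum > n:
--             count += 1
--             if count > k:
--                 break
--             enemies_sum += q.get()
--         answer += 1
--     return answer
-- ===== SOURCE B (Python) =====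
-- import heapq
-- def solution(n, k, enemy):
--     heap = []
--     total = 0
--     for i, e in enumerate(enemy):
--         heapq.heappush(heap, e)
--         if len(heap) > k:
--             total += heapq.heappop(heap)
--             if total > n:
--                 return i
--     return len(enemy)
-- ===== Notes on version B (the rewrite author's own statement) =====
-- stated objective: faster
-- what changed: Replaces A's PriorityQueue over all enemies (negation trick, count/break bookkeeping) with a bounded heapq min-heap that keeps only the k enemies assigned to powers, accumulating the cost of the rest and returning the loop index directly.
-- outside the precondition, e.g. on solution(1, 2, [1, 1, 4, -2, 5, 9]): A returns 4, B returns 5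
import Mathlib
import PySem

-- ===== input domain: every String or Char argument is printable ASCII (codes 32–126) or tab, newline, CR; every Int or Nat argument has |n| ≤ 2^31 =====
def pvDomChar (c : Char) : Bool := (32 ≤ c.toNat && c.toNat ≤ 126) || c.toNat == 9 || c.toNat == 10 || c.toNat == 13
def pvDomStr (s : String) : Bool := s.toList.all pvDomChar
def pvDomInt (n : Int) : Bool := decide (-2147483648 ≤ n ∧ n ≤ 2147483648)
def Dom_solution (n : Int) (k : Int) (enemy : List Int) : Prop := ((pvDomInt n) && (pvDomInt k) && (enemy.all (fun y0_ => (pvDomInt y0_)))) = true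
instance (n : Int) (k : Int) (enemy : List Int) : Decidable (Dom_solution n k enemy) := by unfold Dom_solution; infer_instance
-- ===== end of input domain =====

-- B replaces A's PriorityQueue over all enemies (negation trick, count/break bookkeeping) by a
-- bounded min-heap of the k enemies assigned to powers; equivalence is about the return value only.

-- Sorted-ascending-list model of a binary min-heap (PriorityQueue.put / heapq.heappush insert,
-- .get / heappop take the head = minimum); exact for Int elements, where tie order is unobservable.
def pvInsAsc (x : Int) : List Int → List Int
  | [] => [x]
  | h :: t => if x < h then x :: h :: t else h :: pvInsAsc x t

-- ===== PORT A =====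
-- the for-loop of A; state: q (min-heap of negated enemies), enemies_sum, count, answer
def solutionLoop (n : Int) (k : Int) : List Int → List Int → Int → Int → Int → Int
  | [], _, _, _, answer => answer
  | e :: rest, q, s, count, answer =>
    let q1 := pvInsAsc (-1 * e) q          -- q.put(-1*enemy[i])
    let s1 := s + e                        -- enemies_sum += enemy_num
    if s1 > n then
      if count + 1 > k then answer         -- break
      else
        -- enemies_sum += q.get(); q1 is nonempty (we just put), headD's default is never used
        solutionLoop n k rest q1.tail (s1 + q1.headD 0) (count + 1) (answer + 1)
    else solutionLoop n k rest q1 s1 count (answer + 1)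

def solution (n : Int) (k : Int) (enemy : List Int) : Int :=
  solutionLoop n k enemy [] 0 0 0

-- ===== PORT B =====
-- the for-loop of B; state: i (enumerate index), heap (bounded min-heap), total
def solutionAltLoop (n : Int) (k : Int) : List Int → Int → List Int → Int → Int
  | [], i, _, _ => i                       -- return len(enemy)
  | e :: rest, i, heap, total =>
    let h1 := pvInsAsc e heap              -- heapq.heappush(heap, e)
    if (h1.length : Int) > k then
      let t1 := total + h1.headD 0         -- total += heapq.heappop(heap)
      if t1 > n then i
      else solutionAltLoop n k rest (i + 1) h1.tail t1
    else solutionAltLoop n k rest (i + 1) h1 total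

def solution_alt (n : Int) (k : Int) (enemy : List Int) : Int :=
  solutionAltLoop n k enemy 0 [] 0

-- ===== PRECONDITION & SPEC =====
-- Pre_ restricts to the problem's natural domain (per-round enemy counts are nonnegative); on
-- negative "enemy counts" A's pop-max-on-overflow greedy and B's keep-k-largest greedy genuinely
-- choose different rounds to spend powers on and return different round counts.
def Pre_solution (n : Int) (k : Int) (enemy : List Int) : Prop := ∀ x ∈ enemy, 0 ≤ x
instance (n : Int) (k : Int) (enemy : List Int) : Decidable (Pre_solution n k enemy) := by
  unfold Pre_solution; infer_instance

def pvWitness_solution : Int × Int × List Int := (7, 1, [4, 2, 4, 8, 3, 3, 1])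

def Spec_solution (n : Int) (k : Int) (enemy : List Int) (out : Int) : Prop := out = solution_alt n k enemy
instance (n : Int) (k : Int) (enemy : List Int) (out : Int) : Decidable (Spec_solution n k enemy out) := by unfold Spec_solution; infer_instance

-- ===== CLAIM (what is proved, stated in full; the proofs are below) =====
def Claim_equal_solution : Prop := ∀ (n : Int) (k : Int) (enemy : List Int), Dom_solution n k enemy → Pre_solution n k enemy → Spec_solution n k enemy (solution n k enemy)

-- ===== LEMMAS AND PROOFS =====

-- ghost insertion into a descending-sorted list (actual enemy values, largest first)
def pvInsDesc (e : Int) : List Int → List Int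
  | [] => [e]
  | h :: t => if h < e then e :: h :: t else h :: pvInsDesc e t

theorem pvInsDesc_perm (e : Int) (l : List Int) : (pvInsDesc e l).Perm (e :: l) := by
  induction l with
  | nil => simp [pvInsDesc]
  | cons h t ih =>
    simp only [pvInsDesc]
    split
    · exact List.Perm.refl _
    · exact (List.Perm.cons h ih).trans (List.Perm.swap e h t)

theorem pvInsDesc_sum (e : Int) (l : List Int) : (pvInsDesc e l).sum = e + l.sum := by
  have := (pvInsDesc_perm e l).sum_eq
  simpa using this

theorem pvInsDesc_length (e : Int) (l : List Int) : (pvInsDesc e l).length = l.length + 1 := by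
  simpa using (pvInsDesc_perm e l).length_eq

theorem pvInsDesc_sorted (e : Int) (l : List Int) (h : List.Pairwise (· ≥ ·) l) :
    List.Pairwise (· ≥ ·) (pvInsDesc e l) := by
  induction l with
  | nil => simp [pvInsDesc]
  | cons a t ih =>
    have ha := List.pairwise_cons.mp h
    simp only [pvInsDesc]
    split
    · rename_i hlt
      refine List.pairwise_cons.mpr ⟨?_, h⟩
      intro b hb
      rcases List.mem_cons.mp hb with rfl | hb
      · exact le_of_lt hlt
      · exact le_trans (ha.1 b hb) (le_of_lt hlt)
    · rename_i hge
      refine List.pairwise_cons.mpr ⟨?_, ih ha.2⟩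
      intro b hb
      rcases List.mem_cons.mp ((pvInsDesc_perm e t).mem_iff.mp hb) with rfl | hb
      · omega
      · exact ha.1 b hb

theorem pvInsAsc_perm (x : Int) (l : List Int) : (pvInsAsc x l).Perm (x :: l) := by
  induction l with
  | nil => simp [pvInsAsc]
  | cons h t ih =>
    simp only [pvInsAsc]
    split
    · exact List.Perm.refl _
    · exact (List.Perm.cons h ih).trans (List.Perm.swap x h t)

theorem pvInsAsc_sorted (x : Int) (l : List Int) (h : List.Pairwise (· ≤ ·) l) :
    List.Pairwise (· ≤ ·) (pvInsAsc x l) := by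
  induction l with
  | nil => simp [pvInsAsc]
  | cons a t ih =>
    have ha := List.pairwise_cons.mp h
    simp only [pvInsAsc]
    split
    · rename_i hlt
      refine List.pairwise_cons.mpr ⟨?_, h⟩
      intro b hb
      rcases List.mem_cons.mp hb with rfl | hb
      · exact le_of_lt hlt
      · exact le_trans (le_of_lt hlt) (ha.1 b hb)
    · rename_i hge
      refine List.pairwise_cons.mpr ⟨?_, ih ha.2⟩
      intro b hb
      rcases List.mem_cons.mp ((pvInsAsc_perm x t).mem_iff.mp hb) with rfl | hb
      · omega
      · exact ha.1 b hb

-- pushing -e onto A's heap of negated values is the ghost descending insert, negated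
theorem pvInsAsc_neg (e : Int) (l : List Int) :
    pvInsAsc (-e) (l.map (fun x => -x)) = (pvInsDesc e l).map (fun x => -x) := by
  induction l with
  | nil => simp [pvInsAsc, pvInsDesc]
  | cons h t ih =>
    simp only [List.map_cons, pvInsAsc, pvInsDesc]
    by_cases hc : h < e
    · rw [if_pos (by omega), if_pos hc]; simp
    · rw [if_neg (by omega), if_neg hc]
      simp only [List.map_cons, ih]

-- pushing onto B's ascending heap is the ghost descending insert, reversed
theorem pvInsAsc_reverse (e : Int) (l : List Int) (h : List.Pairwise (· ≥ ·) l) :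
    pvInsAsc e l.reverse = (pvInsDesc e l).reverse := by
  have h1 : List.Pairwise (· ≤ ·) l.reverse := List.pairwise_reverse.mpr h
  have h2 : List.Pairwise (· ≤ ·) (pvInsDesc e l).reverse :=
    List.pairwise_reverse.mpr (pvInsDesc_sorted e l h)
  refine List.Perm.eq_of_pairwise (fun a b _ _ hab hba => le_antisymm hab hba)
    (pvInsAsc_sorted e l.reverse h1) h2 ?_
  exact (pvInsAsc_perm e l.reverse).trans
    ((List.Perm.cons e l.reverse_perm).trans
      ((pvInsDesc_perm e l).symm.trans (pvInsDesc e l).reverse_perm.symm))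

-- K1: when e is ≤ everything in the first t positions, insertion happens in the tail part
theorem pvInsDesc_take_of_le (e : Int) (l : List Int) (t : ℕ) (ht : t ≤ l.length)
    (hc : ∀ x ∈ l.take t, e ≤ x) : (pvInsDesc e l).take t = l.take t := by
  induction l generalizing t with
  | nil => simp at ht; simp [ht]
  | cons h tl ih =>
    cases t with
    | zero => simp
    | succ t' =>
      have hh : e ≤ h := hc h (by simp)
      simp only [pvInsDesc, if_neg (by omega : ¬ h < e), List.take_succ_cons]
      rw [ih t' (by simpa using ht) (fun x hx => hc x (by simp [hx]))]

theorem pvInsDesc_drop_of_le (e : Int) (l : List Int) (t : ℕ) (ht : t ≤ l.length)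
    (hc : ∀ x ∈ l.take t, e ≤ x) : (pvInsDesc e l).drop t = pvInsDesc e (l.drop t) := by
  induction l generalizing t with
  | nil => simp at ht; simp [ht]
  | cons h tl ih =>
    cases t with
    | zero => simp
    | succ t' =>
      have hh : e ≤ h := hc h (by simp)
      simp only [pvInsDesc, if_neg (by omega : ¬ h < e), List.drop_succ_cons]
      exact ih t' (by simpa using ht) (fun x hx => hc x (by simp [hx]))

-- K2: when some element among the first t positions is < e, insertion happens inside them
theorem pvInsDesc_take_of_lt (e : Int) (l : List Int) (t : ℕ)
    (hc : ∃ x ∈ l.take t, x < e) : (pvInsDesc e l).take t = pvInsDesc e (l.take (t - 1)) := by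
  induction l generalizing t with
  | nil => simp at hc
  | cons h tl ih =>
    cases t with
    | zero => simp at hc
    | succ t' =>
      simp only [pvInsDesc]
      by_cases hh : h < e
      · rw [if_pos hh]
        cases t' with
        | zero => simp [pvInsDesc]
        | succ t'' =>
          simp only [List.take_succ_cons, Nat.succ_sub_one, pvInsDesc, if_pos hh]
      · rw [if_neg hh]
        have hc' : ∃ x ∈ tl.take t', x < e := by
          rcases hc with ⟨x, hx, hxe⟩
          rcases List.mem_cons.mp (by simpa using hx) with rfl | hx'
          · omega
          · exact ⟨x, hx', hxe⟩
        rcases hc' with ⟨x, hxmem, hxe⟩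
        have ht' : t' ≠ 0 := by
          intro h0; rw [h0] at hxmem; simp at hxmem
        simp only [List.take_succ_cons, Nat.succ_sub_one]
        rw [ih t' ⟨x, hxmem, hxe⟩]
        obtain ⟨t'', rfl⟩ := Nat.exists_eq_succ_of_ne_zero ht'
        simp only [Nat.succ_sub_one, List.take_succ_cons, pvInsDesc, if_neg hh]

theorem pvInsDesc_drop_of_lt (e : Int) (l : List Int) (t : ℕ)
    (hc : ∃ x ∈ l.take t, x < e) : (pvInsDesc e l).drop t = l.drop (t - 1) := by
  induction l generalizing t with
  | nil => simp at hc
  | cons h tl ih =>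
    cases t with
    | zero => simp at hc
    | succ t' =>
      simp only [pvInsDesc]
      by_cases hh : h < e
      · rw [if_pos hh]
        simp only [List.drop_succ_cons, Nat.succ_sub_one]
      · rw [if_neg hh]
        have hc' : ∃ x ∈ tl.take t', x < e := by
          rcases hc with ⟨x, hx, hxe⟩
          rcases List.mem_cons.mp (by simpa using hx) with rfl | hx'
          · omega
          · exact ⟨x, hx', hxe⟩
        rcases hc' with ⟨x, hxmem, hxe⟩
        have ht' : t' ≠ 0 := by
          intro h0; rw [h0] at hxmem; simp at hxmem
        simp only [List.drop_succ_cons, Nat.succ_sub_one]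
        rw [ih t' ⟨x, hxmem, hxe⟩]
        obtain ⟨t'', rfl⟩ := Nat.exists_eq_succ_of_ne_zero ht'
        simp

-- elements in the first t positions dominate elements from position t-1 on
theorem pvSorted_take_drop (l : List Int) (t : ℕ) (hs : List.Pairwise (· ≥ ·) l)
    (x y : Int) (hx : x ∈ l.take t) (hy : y ∈ l.drop (t - 1)) : y ≤ x := by
  cases t with
  | zero => simp at hx
  | succ t' =>
    simp only [Nat.succ_sub_one] at hy
    have hsplit : l.take (t' + 1) = l.take t' ++ (l.drop t').take 1 := List.take_add
    have hs' : List.Pairwise (· ≥ ·) (l.take t' ++ l.drop t') := by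
      rw [List.take_append_drop]; exact hs
    rcases List.mem_append.mp (hsplit ▸ hx) with hx1 | hx2
    · exact (List.pairwise_append.mp hs').2.2 x hx1 y hy
    · cases hd : l.drop t' with
      | nil => rw [hd] at hy; simp at hy
      | cons a u =>
        rw [hd] at hx2 hy
        simp at hx2
        have hsd : List.Pairwise (· ≥ ·) (a :: u) := hd ▸ hs.sublist (List.drop_sublist t' l)
        rcases List.mem_cons.mp hy with rfl | hy'
        · omega
        · have := (List.pairwise_cons.mp hsd).1 y hy'
          omega

-- drop-sums shrink as we drop more, for nonnegative lists
theorem pvDropSum_mono (l : List Int) (hnn : ∀ x ∈ l, 0 ≤ x) (a b : ℕ) (hab : a ≤ b) :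
    (l.drop b).sum ≤ (l.drop a).sum := by
  have h1 : (l.drop a).take (b - a) ++ l.drop b = l.drop a := by
    rw [show l.drop b = (l.drop a).drop (b - a) by rw [List.drop_drop]; congr 1; omega]
    exact List.take_append_drop _ _
  have h2 : 0 ≤ ((l.drop a).take (b - a)).sum := by
    apply List.sum_nonneg
    intro x hx
    exact hnn x (List.mem_of_mem_drop (List.mem_of_mem_take hx))
  calc (l.drop b).sum ≤ ((l.drop a).take (b - a)).sum + (l.drop b).sum := by omega
    _ = (l.drop a).sum := by rw [← List.sum_append, h1]

-- membership in a shorter take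
theorem pvMemTake (l : List Int) (a b : ℕ) (hab : a ≤ b) (x : Int) (hx : x ∈ l.take a) :
    x ∈ l.take b := by
  have : l.take a = (l.take b).take a := by rw [List.take_take]; congr 1; omega
  exact List.mem_of_mem_take (this ▸ hx)

-- B's push-then-pop step: the popped value c and the remaining heap, through the ghost list
theorem pvBstep (e : Int) (D : List Int) (m : ℕ) (hs : List.Pairwise (· ≥ ·) D)
    (hm : m ≤ D.length) :
    ∃ c : Int,
      pvInsAsc e ((D.take m).reverse) = c :: ((pvInsDesc e D).take m).reverse ∧
      (D.drop m).sum + c = ((pvInsDesc e D).drop m).sum := by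
  have hstake : List.Pairwise (· ≥ ·) (D.take m) := hs.sublist (List.take_sublist _ _)
  have hrw : pvInsAsc e ((D.take m).reverse) = (pvInsDesc e (D.take m)).reverse :=
    pvInsAsc_reverse e (D.take m) hstake
  have hGsplit : pvInsDesc e (D.take m)
      = (pvInsDesc e (D.take m)).take m ++ (pvInsDesc e (D.take m)).drop m :=
    (List.take_append_drop _ _).symm
  by_cases hx : ∃ x ∈ D.take m, x < e
  · -- insertion lands inside the top-m part; the former m-th largest is popped
    have htt : (D.take m).take m = D.take m := by rw [List.take_take, Nat.min_self]
    have hx' : ∃ x ∈ (D.take m).take m, x < e := by rw [htt]; exact hx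
    have hG1 : (pvInsDesc e (D.take m)).take m = pvInsDesc e ((D.take m).take (m-1)) :=
      pvInsDesc_take_of_lt e (D.take m) m hx'
    have hG2 : (pvInsDesc e (D.take m)).drop m = (D.take m).drop (m-1) :=
      pvInsDesc_drop_of_lt e (D.take m) m hx'
    have hm1 : 1 ≤ m := by
      rcases hx with ⟨x, hxm, _⟩
      rcases m with _ | m'
      · simp at hxm
      · omega
    have hmlt : m - 1 < D.length := by omega
    have hmm : m - 1 + 1 = m := by omega
    have hdropc : D.drop (m-1) = D[m-1]'hmlt :: D.drop m := by
      have h0 := List.drop_eq_getElem_cons hmlt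
      rw [hmm] at h0; exact h0
    have htd : (D.take m).drop (m-1) = [D[m-1]'hmlt] := by
      rw [List.drop_take, hdropc]
      have : m - (m-1) = 1 := by omega
      rw [this]; simp
    have httm : (D.take m).take (m-1) = D.take (m-1) := by
      rw [List.take_take]; congr 1; omega
    refine ⟨D[m-1]'hmlt, ?_, ?_⟩
    · rw [hrw]
      conv_lhs => rw [hGsplit]
      rw [hG1, hG2, htd, httm, List.reverse_append]
      have hD1 : (pvInsDesc e D).take m = pvInsDesc e (D.take (m-1)) :=
        pvInsDesc_take_of_lt e D m hx
      rw [hD1]; simp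
    · have hD2 : (pvInsDesc e D).drop m = D.drop (m-1) := pvInsDesc_drop_of_lt e D m hx
      rw [hD2, hdropc]; simp; ring
  · -- e is ≤ the whole top-m part: e itself is popped straight back out
    push_neg at hx
    have htt : (D.take m).take m = D.take m := by rw [List.take_take, Nat.min_self]
    have hx' : ∀ x ∈ (D.take m).take m, e ≤ x := by rw [htt]; exact hx
    have hxw : ∀ x ∈ D.take m, e ≤ x := hx
    have hG1 : (pvInsDesc e (D.take m)).take m = (D.take m).take m :=
      pvInsDesc_take_of_le e (D.take m) m (by rw [List.length_take]; omega) hx'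
    have hG2 : (pvInsDesc e (D.take m)).drop m = pvInsDesc e ((D.take m).drop m) :=
      pvInsDesc_drop_of_le e (D.take m) m (by rw [List.length_take]; omega) hx'
    have htdm : (D.take m).drop m = [] := by
      apply List.drop_eq_nil_of_le; simp [List.length_take]
    refine ⟨e, ?_, ?_⟩
    · rw [hrw]
      conv_lhs => rw [hGsplit]
      rw [hG1, hG2, htdm, List.take_take, List.reverse_append]
      have hD1 : (pvInsDesc e D).take m = D.take m := pvInsDesc_take_of_le e D m hm hxw
      rw [hD1]
      simp [pvInsDesc]
    · have hD2 : (pvInsDesc e D).drop m = pvInsDesc e (D.drop m) :=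
        pvInsDesc_drop_of_le e D m hm hxw
      rw [hD2, pvInsDesc_sum]; ring

-- one step of B, normalized: pop happens iff k.toNat ≤ |D|; B returns iff it pops and the
-- accumulated cost of the non-top-k enemies exceeds n; otherwise the state advances to insert e
theorem pvBstepEq (n k e : Int) (rest D : List Int) (hs : List.Pairwise (· ≥ ·) D) :
    solutionAltLoop n k (e :: rest) (D.length : Int)
        ((D.take (min k.toNat D.length)).reverse) ((D.drop (min k.toNat D.length)).sum)
      = if k.toNat ≤ D.length ∧ ((pvInsDesc e D).drop k.toNat).sum > n then (D.length : Int)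
        else solutionAltLoop n k rest ((pvInsDesc e D).length : Int)
            (((pvInsDesc e D).take (min k.toNat (pvInsDesc e D).length)).reverse)
            (((pvInsDesc e D).drop (min k.toNat (pvInsDesc e D).length)).sum) := by
  simp only [solutionAltLoop]
  by_cases hpop : k.toNat ≤ D.length
  · have hm : min k.toNat D.length = k.toNat := by omega
    obtain ⟨c, hpush, hsum⟩ := pvBstep e D k.toNat hs hpop
    rw [hm, hpush]
    have hlen1 : ((c :: ((pvInsDesc e D).take k.toNat).reverse).length : Int) > k := by
      simp [List.length_take, pvInsDesc_length]
      omega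
    rw [if_pos hlen1]
    simp only [List.headD_cons, List.tail_cons]
    rw [hsum]
    by_cases hret : ((pvInsDesc e D).drop k.toNat).sum > n
    · rw [if_pos hret, if_pos ⟨hpop, hret⟩]
    · rw [if_neg hret, if_neg (by tauto)]
      have hmin2 : min k.toNat (pvInsDesc e D).length = k.toNat := by
        rw [pvInsDesc_length]; omega
      rw [hmin2, pvInsDesc_length]
      push_cast
      ring_nf
  · have hm : min k.toNat D.length = D.length := by omega
    have hpush2 : pvInsAsc e ((D.take (min k.toNat D.length)).reverse) = (pvInsDesc e D).reverse := by
      rw [hm, List.take_length]; exact pvInsAsc_reverse e D hs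
    rw [hpush2]
    have hlen2 : ¬ (((pvInsDesc e D).reverse.length : Int) > k) := by
      simp [pvInsDesc_length]
      omega
    rw [if_neg hlen2, if_neg (by omega)]
    have hmin2 : min k.toNat (pvInsDesc e D).length = (pvInsDesc e D).length := by
      rw [pvInsDesc_length]; omega
    rw [hmin2, List.take_length, List.drop_length, hm, List.drop_length, pvInsDesc_length]
    push_cast
    ring_nf

theorem pvMain (n k : Int) : ∀ (l : List Int) (D : List Int) (cnt : ℕ),
    (∀ x ∈ l, 0 ≤ x) → (∀ x ∈ D, 0 ≤ x) → List.Pairwise (· ≥ ·) D →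
    cnt ≤ k.toNat → cnt ≤ D.length →
    (cnt < D.length → (D.drop cnt).sum ≤ n) →
    (1 ≤ cnt → n < (D.drop (cnt - 1)).sum) →
    solutionLoop n k l ((D.drop cnt).map (fun x => -x)) ((D.drop cnt).sum) (cnt : Int) (D.length : Int)
      = solutionAltLoop n k l (D.length : Int) ((D.take (min k.toNat D.length)).reverse)
          ((D.drop (min k.toNat D.length)).sum) := by
  intro l
  induction l with
  | nil =>
    intro D cnt _ _ _ _ _ _ _
    simp [solutionLoop, solutionAltLoop]
  | cons e rest ih =>
    intro D cnt hl hD hs hck hclen hF3 hJ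
    have he : 0 ≤ e := hl e (by simp)
    have hrest : ∀ x ∈ rest, 0 ≤ x := fun x hx => hl x (by simp [hx])
    have hperm : (pvInsDesc e D).Perm (e :: D) := pvInsDesc_perm e D
    have hD'nn : ∀ x ∈ pvInsDesc e D, 0 ≤ x := by
      intro x hx
      rcases List.mem_cons.mp (hperm.mem_iff.mp hx) with rfl | hx
      · exact he
      · exact hD x hx
    have hD'sorted : List.Pairwise (· ≥ ·) (pvInsDesc e D) := pvInsDesc_sorted e D hs
    have hD'len : (pvInsDesc e D).length = D.length + 1 := pvInsDesc_length e D
    have hq1 : pvInsAsc (-1 * e) ((D.drop cnt).map (fun x => -x))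
        = (pvInsDesc e (D.drop cnt)).map (fun x => -x) := by
      rw [neg_one_mul]; exact pvInsAsc_neg e (D.drop cnt)
    have hHsum : (pvInsDesc e (D.drop cnt)).sum = e + (D.drop cnt).sum := pvInsDesc_sum _ _
    have hHsorted : List.Pairwise (· ≥ ·) (pvInsDesc e (D.drop cnt)) :=
      pvInsDesc_sorted e _ (hs.sublist (List.drop_sublist _ _))
    rw [pvBstepEq n k e rest D hs]
    by_cases hbreach : (D.drop cnt).sum + e > n
    · by_cases hbreak : (cnt : Int) + 1 > k
      · -- A breaks and B returns: both give the current round count |D|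
        have hkcnt : k.toNat = cnt := by omega
        have ht1 : ((pvInsDesc e D).drop cnt).sum > n := by
          by_cases hx : ∃ x ∈ D.take cnt, x < e
          · rw [pvInsDesc_drop_of_lt e D cnt hx]
            have hc1 : 1 ≤ cnt := by
              rcases hx with ⟨x, hxm, _⟩
              rcases cnt with _ | c'
              · simp at hxm
              · omega
            exact hJ hc1
          · push_neg at hx
            rw [pvInsDesc_drop_of_le e D cnt hclen hx, pvInsDesc_sum]
            omega
        rw [if_pos (by rw [hkcnt]; exact ⟨hclen, ht1⟩)]
        simp only [solutionLoop]
        rw [if_pos hbreach, if_pos hbreak]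
      · -- A pops its max and keeps going; B (if it pops at all) stays under budget
        have hk1 : (cnt : Int) + 1 ≤ k := by omega
        -- dissect A's pushed heap
        obtain ⟨c, T, hH⟩ : ∃ c T, pvInsDesc e (D.drop cnt) = c :: T := by
          cases hH0 : pvInsDesc e (D.drop cnt) with
          | nil =>
            exfalso
            have h1 := pvInsDesc_length e (D.drop cnt)
            rw [hH0] at h1
            simp at h1
          | cons a b => exact ⟨a, b, rfl⟩
        have hec : e ≤ c := by
          have hmem : e ∈ pvInsDesc e (D.drop cnt) := (pvInsDesc_perm e _).mem_iff.mpr (by simp)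
          rw [hH] at hmem hHsorted
          rcases List.mem_cons.mp hmem with rfl | hmem
          · exact le_refl _
          · exact (List.pairwise_cons.mp hHsorted).1 e hmem
        have hTsum : c + T.sum = e + (D.drop cnt).sum := by
          rw [← hHsum, hH]; simp
        have hT : T = (pvInsDesc e D).drop (cnt + 1) := by
          by_cases hx : ∃ x ∈ D.take cnt, x < e
          · -- e exceeds the popped minimum: e itself is the new max and is popped back
            have hc1 : 1 ≤ cnt := by
              rcases hx with ⟨x, hxm, _⟩
              rcases cnt with _ | c'
              · simp at hxm
              · omega
            have hHe : pvInsDesc e (D.drop cnt) = e :: D.drop cnt := by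
              cases hd : D.drop cnt with
              | nil => simp [pvInsDesc]
              | cons a u =>
                have hmlt : cnt - 1 < D.length := by omega
                have hmm : cnt - 1 + 1 = cnt := by omega
                have hdr : D.drop (cnt - 1) = D[cnt-1]'hmlt :: D.drop cnt := by
                  have h0 := List.drop_eq_getElem_cons hmlt
                  rw [hmm] at h0; exact h0
                have hamem : a ∈ D.drop (cnt - 1) := by rw [hdr, hd]; simp
                rcases hx with ⟨x, hxm, hxe⟩
                have hax : a ≤ x := pvSorted_take_drop D cnt hs x a hxm hamem
                simp [pvInsDesc, show a < e by omega]
            have hce : c = e ∧ T = D.drop cnt := by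
              have := hH.symm.trans hHe
              exact ⟨(List.cons.injEq _ _ _ _ ▸ this).1, (List.cons.injEq _ _ _ _ ▸ this).2⟩
            rw [hce.2, pvInsDesc_drop_of_lt e D (cnt+1)
              ⟨hx.choose, pvMemTake D cnt (cnt+1) (by omega) _ hx.choose_spec.1, hx.choose_spec.2⟩]
            simp
          · push_neg at hx
            have hdc : (pvInsDesc e D).drop cnt = pvInsDesc e (D.drop cnt) :=
              pvInsDesc_drop_of_le e D cnt hclen hx
            have : (pvInsDesc e D).drop (cnt + 1) = ((pvInsDesc e D).drop cnt).drop 1 := by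
              rw [List.drop_drop]
            rw [this, hdc, hH]
            simp
        have hJ' : 1 ≤ cnt + 1 → n < ((pvInsDesc e D).drop (cnt + 1 - 1)).sum := by
          intro _
          simp only [Nat.add_sub_cancel]
          by_cases hx : ∃ x ∈ D.take cnt, x < e
          · rw [pvInsDesc_drop_of_lt e D cnt hx]
            have hc1 : 1 ≤ cnt := by
              rcases hx with ⟨x, hxm, _⟩
              rcases cnt with _ | c'
              · simp at hxm
              · omega
            exact hJ hc1
          · push_neg at hx
            rw [pvInsDesc_drop_of_le e D cnt hclen hx, pvInsDesc_sum]
            omega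
        have hF3' : cnt + 1 < (pvInsDesc e D).length → (((pvInsDesc e D).drop (cnt + 1)).sum ≤ n) := by
          intro hlt
          rw [hD'len] at hlt
          have hs0 : (D.drop cnt).sum ≤ n := hF3 (by omega)
          have : c + ((pvInsDesc e D).drop (cnt + 1)).sum = e + (D.drop cnt).sum := by
            rw [← hT]; exact hTsum
          omega
        have hck' : cnt + 1 ≤ k.toNat := by omega
        have hclen' : cnt + 1 ≤ (pvInsDesc e D).length := by omega
        have hIH := ih (pvInsDesc e D) (cnt + 1) hrest hD'nn hD'sorted hck' hclen' hF3' hJ'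
        -- B does not return this round even if it pops
        rw [if_neg ?hBno]
        case hBno =>
          rintro ⟨hpop, hgt⟩
          have hmono : ((pvInsDesc e D).drop k.toNat).sum ≤ ((pvInsDesc e D).drop (cnt + 1)).sum :=
            pvDropSum_mono _ hD'nn (cnt + 1) k.toNat hck'
          have := hF3' (by omega)
          omega
        -- A recurses; line its state up with the IH
        simp only [solutionLoop]
        rw [if_pos hbreach, if_neg hbreak, hq1, hH]
        simp only [List.map_cons, List.headD_cons, List.tail_cons]
        rw [← hIH]
        have harg : (D.drop cnt).sum + e + -c = ((pvInsDesc e D).drop (cnt + 1)).sum := by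
          have : c + ((pvInsDesc e D).drop (cnt + 1)).sum = e + (D.drop cnt).sum := by
            rw [← hT]; exact hTsum
          omega
        rw [hT, harg, hD'len]
        push_cast
        ring_nf
    · -- no breach: A just accumulates; B (if it pops) stays under budget
      have hcond : ∀ x ∈ D.take cnt, e ≤ x := by
        by_contra hcon
        push_neg at hcon
        obtain ⟨x, hxm, hxe⟩ := hcon
        have hc1 : 1 ≤ cnt := by
          rcases cnt with _ | c'
          · simp at hxm
          · omega
        have hmlt : cnt - 1 < D.length := by omega
        have hmm : cnt - 1 + 1 = cnt := by omega
        have hdr : D.drop (cnt - 1) = D[cnt-1]'hmlt :: D.drop cnt := by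
          have h0 := List.drop_eq_getElem_cons hmlt
          rw [hmm] at h0; exact h0
        have hmem : D[cnt-1]'hmlt ∈ D.drop (cnt - 1) := by rw [hdr]; simp
        have hle : D[cnt-1]'hmlt ≤ x := pvSorted_take_drop D cnt hs x _ hxm hmem
        have hsum : (D.drop (cnt-1)).sum = D[cnt-1]'hmlt + (D.drop cnt).sum := by
          rw [hdr]; simp
        have := hJ hc1
        omega
      have hdc : (pvInsDesc e D).drop cnt = pvInsDesc e (D.drop cnt) :=
        pvInsDesc_drop_of_le e D cnt hclen hcond
      have hJ' : 1 ≤ cnt → n < ((pvInsDesc e D).drop (cnt - 1)).sum := by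
        intro hc1
        have hcond' : ∀ x ∈ D.take (cnt - 1), e ≤ x :=
          fun x hx => hcond x (pvMemTake D (cnt-1) cnt (by omega) x hx)
        rw [pvInsDesc_drop_of_le e D (cnt-1) (by omega) hcond', pvInsDesc_sum]
        have := hJ hc1
        omega
      have hF3' : cnt < (pvInsDesc e D).length → (((pvInsDesc e D).drop cnt).sum ≤ n) := by
        intro _
        rw [hdc, hHsum]
        omega
      have hck' : cnt ≤ k.toNat := hck
      have hclen' : cnt ≤ (pvInsDesc e D).length := by omega
      have hIH := ih (pvInsDesc e D) cnt hrest hD'nn hD'sorted hck' hclen' hF3' hJ'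
      rw [if_neg ?hBno2]
      case hBno2 =>
        rintro ⟨hpop, hgt⟩
        have hmono : ((pvInsDesc e D).drop k.toNat).sum ≤ ((pvInsDesc e D).drop cnt).sum :=
          pvDropSum_mono _ hD'nn cnt k.toNat hck
        rw [hdc, hHsum] at hmono
        omega
      simp only [solutionLoop]
      rw [if_neg hbreach, hq1, ← hdc, ← hIH]
      have harg : (D.drop cnt).sum + e = ((pvInsDesc e D).drop cnt).sum := by
        rw [hdc, hHsum]; ring
      rw [harg, hD'len]
      push_cast
      ring_nf

-- ===== VERDICT (by name: the statement is the Claim_ definition above) =====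
theorem solution_spec : Claim_equal_solution := by
  intro n k enemy _ hpre
  unfold Spec_solution solution solution_alt
  have := pvMain n k enemy [] 0 hpre (by simp) (by simp) (by simp) (by simp) (by simp) (by simp)
  simpa using this
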